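-- pv_equiv track=rewrite | github.com/Raulzito311/CEFET_ProblemasInversosEmPython | trabalho1/exercicio_2_3.py | legal
-- ===== SOURCE A (Python) =====
-- def legal(n):
--     # Converte o valor absoluto de 'n' para uma string para tratar o número de forma mais fácil
--     # Obs: a função 'abs' foi utilizada para simplificação do código, mas poderia ser substituída por uma multiplicação por -1 caso o número fosse negativo
--     s = str(abs(n))
--
--     # Inicializa a variável 'soma' que irá acumular a soma dos dígitos ímpares
--     soma = 0
--
--     # Itera sobre cada caractere da string 's'
--     for c in s:
--         # Converte o caractere para inteiro
--         d = int(c)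
--
--         # Verifica se o dígito 'd' é par
--         if (d % 2) == 0:
--             # Se encontrar um dígito par, retorna False, pois o número não é "legal"
--             return False
--
--         # Se o dígito for ímpar, soma o valor de 'd' à variável 'soma'
--         soma += d
--
--     # Após a soma de todos os dígitos ímpares, verifica se a soma é par
--     return (soma % 2) == 0
-- ===== SOURCE B (Python) =====
-- def legal(n):
--     s = str(abs(n))
--     if any(int(c) % 2 == 0 for c in s):
--         return False
--     # all digits are odd, so the digit sum is even iff there are evenly many digits
--     return len(s) % 2 == 0
-- ===== Notes on version B (the rewrite author's own statement) =====
-- stated objective: simpler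
-- what changed: B drops the running digit-sum accumulator: it tests all digits odd, then returns len(s) % 2 == 0, using that a sum of k odd digits is even iff k is even.
import Mathlib
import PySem

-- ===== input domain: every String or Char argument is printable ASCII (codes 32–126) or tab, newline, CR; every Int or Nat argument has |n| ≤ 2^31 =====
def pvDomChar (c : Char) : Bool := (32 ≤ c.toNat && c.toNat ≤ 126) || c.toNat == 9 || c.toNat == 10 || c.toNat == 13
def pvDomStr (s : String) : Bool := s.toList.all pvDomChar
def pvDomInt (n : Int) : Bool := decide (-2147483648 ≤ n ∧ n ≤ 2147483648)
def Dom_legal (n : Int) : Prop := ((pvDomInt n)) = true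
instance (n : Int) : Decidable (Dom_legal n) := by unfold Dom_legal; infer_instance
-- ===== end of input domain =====

-- B drops A's running digit-sum accumulator: it checks all digits odd, then returns length-parity (a sum of k odd digits is even iff k is even).


-- ===== PORT A =====
-- int(c) for a single decimal-digit character (the only chars str(abs(n)) yields): exact there.
def digitVal (c : Char) : Int := (c.toNat : Int) - 48

-- the for-loop over s with the 'soma' accumulator and the early 'return False'
def legalLoop : List Char → Int → Bool
  | [], soma => (soma % 2) == 0
  | c :: cs, soma =>
      let d := digitVal c
      if (d % 2) == 0 then false
      else legalLoop cs (soma + d)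

def legal (n : Int) : Bool :=
  legalLoop (PySem.Int.toChars |n|) 0

-- ===== PORT B =====
def legal_alt (n : Int) : Bool :=
  let s := PySem.Int.toChars |n|
  if s.any (fun c => (digitVal c % 2) == 0) then false
  else ((s.length : Int) % 2) == 0

-- ===== PRECONDITION & SPEC =====
def Spec_legal (n : Int) (out : Bool) : Prop := out = legal_alt n
instance (n : Int) (out : Bool) : Decidable (Spec_legal n out) := by unfold Spec_legal; infer_instance

-- ===== CLAIM (what is proved, stated in full; the proofs are below) =====
def Claim_equal_legal : Prop := ∀ (n : Int), Dom_legal n → Spec_legal n (legal n)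

-- ===== LEMMAS AND PROOFS =====

-- A's loop, characterised: all digits odd, and the parity of soma plus the digit count.
theorem legalLoop_eq (cs : List Char) : ∀ (soma : Int),
    legalLoop cs soma =
      (cs.all (fun c => !((digitVal c % 2) == 0)) && (((soma + cs.length) % 2) == 0)) := by
  induction cs with
  | nil => intro soma; simp [legalLoop]
  | cons c cs ih =>
    intro soma
    simp only [legalLoop, List.all_cons]
    by_cases h : (digitVal c % 2) == 0
    · simp [h]
    · have hd : digitVal c % 2 = 1 := by
        rcases Int.emod_two_eq (digitVal c) with h0 | h1
        · exact absurd (by simpa using h0) (by simpa using h)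
        · exact h1
      have hlen : (((c :: cs).length : Int)) = (cs.length : Int) + 1 := by
        push_cast [List.length_cons]; ring
      have hpar : (soma + digitVal c + (cs.length : Int)) % 2
                = (soma + ((c :: cs).length : Int)) % 2 := by omega
      rw [if_neg (by simp [hd]), ih, hpar]
      simp [hd]

theorem all_eq_not_any (cs : List Char) :
    cs.all (fun c => !((digitVal c % 2) == 0)) = !cs.any (fun c => (digitVal c % 2) == 0) := by
  induction cs with
  | nil => rfl
  | cons c cs ih => simp [List.all_cons, List.any_cons, ih]

-- ===== VERDICT (by name: the statement is the Claim_ definition above) =====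
theorem legal_spec : Claim_equal_legal := by
  intro n _
  unfold Spec_legal legal legal_alt
  rw [legalLoop_eq, all_eq_not_any]
  cases h : (PySem.Int.toChars |n|).any (fun c => (digitVal c % 2) == 0) <;> simp [h]
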